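-- pv_equiv track=rewrite | github.com/dataminelab/datareporter | redash/plywood/hash_manager.py | jobs_status
-- ===== SOURCE A (Python) =====
-- from typing import List, Union
--
-- FAILED_QUERY_CODE = 4
--
-- def has_pending(array: List[dict]) -> bool:
--     if len(array) == 0:
--         return False
--     no_duplicates = list(set(array))
--     try:
--         no_duplicates.remove(FAILED_QUERY_CODE)
--     except ValueError:
--         pass
--     if len(no_duplicates) > 0:
--         return True
--     return False
--
-- def jobs_status(data: List[dict]) -> Union[None, int]:
--     all_statuses = []
--     for res in data:
--         if "job" in res:
--             all_statuses.append(res["job"]["status"])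
--
--     if len(all_statuses) == 0:
--         return None
--
--     if has_pending(all_statuses):
--         return 1
--
--     return None
-- ===== SOURCE B (Python) =====
-- FAILED_QUERY_CODE = 4
--
-- def jobs_status(data):
--     for res in data:
--         if "job" in res:
--             if res["job"]["status"] != FAILED_QUERY_CODE:
--                 return 1
--     return None
-- ===== Notes on version B (the rewrite author's own statement) =====
-- stated objective: simpler
-- what changed: Replaced the collect-all-statuses pass plus the set-dedup/remove(4) helper has_pending by a single short-circuiting scan that returns 1 at the first job status different from FAILED_QUERY_CODE and None otherwise.
import Mathlib
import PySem

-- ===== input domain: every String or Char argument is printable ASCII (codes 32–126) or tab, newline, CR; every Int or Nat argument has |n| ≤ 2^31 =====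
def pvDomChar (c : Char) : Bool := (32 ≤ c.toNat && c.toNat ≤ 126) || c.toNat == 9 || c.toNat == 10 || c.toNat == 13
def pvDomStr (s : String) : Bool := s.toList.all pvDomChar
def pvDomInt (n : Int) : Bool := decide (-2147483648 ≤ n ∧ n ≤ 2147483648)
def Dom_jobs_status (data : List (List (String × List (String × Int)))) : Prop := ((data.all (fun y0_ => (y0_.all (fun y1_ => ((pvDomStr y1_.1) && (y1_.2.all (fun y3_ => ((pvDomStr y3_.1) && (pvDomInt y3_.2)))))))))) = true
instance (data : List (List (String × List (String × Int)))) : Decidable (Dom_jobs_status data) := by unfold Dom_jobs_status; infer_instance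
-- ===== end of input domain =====

-- B replaces A's collect-all-statuses pass and set-based has_pending helper by one
-- short-circuiting scan (simpler; return value equivalence proved under Pre_).

-- ===== PORT A =====
-- has_pending(array): dedup via set, try remove FAILED_QUERY_CODE(=4), nonempty?
-- (Python's list(set(..)) iteration order is unspecified; only emptiness is used, so
--  PySem.Set.ofList's first-occurrence order is exact for the result.)
def has_pending (array : List Int) : Bool :=
  if array.length = 0 then false
  else
    let no_duplicates := PySem.Set.ofList array
    let no_duplicates :=
      match PySem.List.remove? no_duplicates 4 with   -- try: remove; except ValueError: pass
      | some l => l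
      | none => no_duplicates
    if no_duplicates.length > 0 then true else false

-- all_statuses loop, then the two returns.  res["job"]["status"]: both lookups are
-- guaranteed by Pre_jobs_status (Python raises KeyError otherwise); .getD 0/[] stand
-- for the raising lookup and are never the default inside Pre_.
def jobs_status (data : List (List (String × List (String × Int)))) : Option Int :=
  let all_statuses := data.foldl (fun acc res =>
      if (PySem.Dict.mk res).contains "job" then
        acc ++ [((PySem.Dict.mk ((PySem.Dict.mk res).getD "job" [])).getD "status" 0)]
      else acc) []
  if all_statuses.length = 0 then none
  else if has_pending all_statuses then some 1
  else none

-- ===== PORT B =====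
def jobs_status_alt (data : List (List (String × List (String × Int)))) : Option Int :=
  match data with
  | [] => none
  | res :: rest =>
    if (PySem.Dict.mk res).contains "job" then
      if ((PySem.Dict.mk ((PySem.Dict.mk res).getD "job" [])).getD "status" 0) ≠ 4 then some 1
      else jobs_status_alt rest
    else jobs_status_alt rest

-- ===== PRECONDITION & SPEC =====
-- Pre_ excludes exactly the inputs on which Python A raises KeyError: a dict that has
-- a "job" entry whose value lacks a "status" key.
def Pre_jobs_status (data : List (List (String × List (String × Int)))) : Prop :=
  ∀ res ∈ data, ∀ j, (PySem.Dict.mk res).get? "job" = some j →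
    ((PySem.Dict.mk j).get? "status").isSome
instance (data : List (List (String × List (String × Int)))) : Decidable (Pre_jobs_status data) := by unfold Pre_jobs_status; infer_instance
def pvWitness_jobs_status : (List (List (String × List (String × Int)))) :=
  [[("job", [("status", 4)])], [("x", [])], [("job", [("status", 1)])]]

def Spec_jobs_status (data : List (List (String × List (String × Int)))) (out : Option Int) : Prop := out = jobs_status_alt data
instance (data : List (List (String × List (String × Int)))) (out : Option Int) : Decidable (Spec_jobs_status data out) := by unfold Spec_jobs_status; infer_instance

-- ===== CLAIM (what is proved, stated in full; the proofs are below) =====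
def Claim_equal_jobs_status : Prop := ∀ (data : List (List (String × List (String × Int)))), Dom_jobs_status data → Pre_jobs_status data → Spec_jobs_status data (jobs_status data)

-- ===== LEMMAS AND PROOFS =====

-- the status of one record, as both ports compute it
def recStatus (res : List (String × List (String × Int))) : Option Int :=
  if (PySem.Dict.mk res).contains "job" then
    some ((PySem.Dict.mk ((PySem.Dict.mk res).getD "job" [])).getD "status" 0)
  else none

-- the list of statuses A collects
def statuses (data : List (List (String × List (String × Int)))) : List Int :=
  data.flatMap (fun res => (recStatus res).toList)

theorem foldl_statuses (data : List (List (String × List (String × Int)))) (acc : List Int) :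
    data.foldl (fun acc res =>
      if (PySem.Dict.mk res).contains "job" then
        acc ++ [((PySem.Dict.mk ((PySem.Dict.mk res).getD "job" [])).getD "status" 0)]
      else acc) acc = acc ++ statuses data := by
  induction data generalizing acc with
  | nil => simp [statuses]
  | cons res rest ih =>
    rw [List.foldl_cons, ih]
    by_cases h : (PySem.Dict.mk res).contains "job"
    · rw [if_pos h]
      simp only [statuses, List.flatMap_cons, recStatus, if_pos h, Option.toList_some]
      simp
    · rw [if_neg h]
      simp only [statuses, List.flatMap_cons, recStatus, if_neg h, Option.toList_none]
      simp

theorem has_pending_eq_any (array : List Int) :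
    has_pending array = array.any (fun s => decide (s ≠ 4)) := by
  unfold has_pending
  split_ifs with h
  · simp [List.length_eq_zero_iff.mp h]
  · show (if (match PySem.List.remove? (PySem.Set.ofList array) 4 with
              | some l => l
              | none => PySem.Set.ofList array).length > 0 then true else false)
        = array.any (fun s => decide (s ≠ 4))
    cases hmem : PySem.List.remove? (PySem.Set.ofList array) 4 with
    | none =>
      have h4 : (4 : Int) ∉ PySem.Set.ofList array :=
        (PySem.List.remove?_eq_none_iff _ _).mp hmem
      have h4' : (4 : Int) ∉ array := fun hx => h4 ((PySem.Set.mem_ofList _ _).mpr hx)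
      show (if (PySem.Set.ofList array).length > 0 then true else false)
          = array.any (fun s => decide (s ≠ 4))
      obtain ⟨x, hx⟩ : ∃ x, x ∈ array :=
        List.exists_mem_of_ne_nil array (fun hn => h (by simp [hn]))
      have hxs : x ∈ PySem.Set.ofList array := (PySem.Set.mem_ofList _ _).mpr hx
      have hlen : (PySem.Set.ofList array).length > 0 := List.length_pos_of_mem hxs
      have hx4 : x ≠ 4 := fun hxx => h4' (hxx ▸ hx)
      rw [if_pos hlen]
      symm
      rw [List.any_eq_true]
      exact ⟨x, hx, by simpa using hx4⟩
    | some l =>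
      have h4 : (4 : Int) ∈ PySem.Set.ofList array := by
        by_contra h4
        rw [(PySem.List.remove?_eq_none_iff _ _).mpr h4] at hmem; simp at hmem
      have herase : l = (PySem.Set.ofList array).erase 4 := by
        have he := PySem.List.remove?_eq_some_erase (PySem.Set.ofList array) 4 h4
        rw [he] at hmem; exact (Option.some_inj.mp hmem).symm
      subst herase
      show (if ((PySem.Set.ofList array).erase 4).length > 0 then true else false)
          = array.any (fun s => decide (s ≠ 4))
      by_cases hany : array.any (fun s => decide (s ≠ 4))
      · rw [List.any_eq_true] at hany
        obtain ⟨x, hx, hx4d⟩ := hany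
        have hx4 : x ≠ 4 := of_decide_eq_true hx4d
        have hany : (array.any fun s => decide (s ≠ 4)) = true :=
          List.any_eq_true.mpr ⟨x, hx, hx4d⟩
        have hxs : x ∈ PySem.Set.ofList array := (PySem.Set.mem_ofList _ _).mpr hx
        have hxe : x ∈ (PySem.Set.ofList array).erase 4 :=
          (List.mem_erase_of_ne hx4).mpr hxs
        have hpos : ((PySem.Set.ofList array).erase 4).length > 0 := by
          cases he : (PySem.Set.ofList array).erase 4 with
          | nil => simp [he] at hxe
          | cons _ _ => simp
        rw [if_pos hpos, eq_comm]
        exact hany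
      · have hall : ∀ x ∈ array, x = 4 := by
          intro x hx
          by_contra hx4
          exact hany (List.any_eq_true.mpr ⟨x, hx, decide_eq_true hx4⟩)
        have hsub : PySem.Set.ofList array = [4] := by
          have hnd := PySem.Set.nodup_ofList (xs := array)
          have hmem' : ∀ x, x ∈ PySem.Set.ofList array ↔ x = (4 : Int) := by
            intro x
            constructor
            · intro hx; exact hall x ((PySem.Set.mem_ofList _ _).mp hx)
            · intro hx; subst hx; exact h4
          cases hl : PySem.Set.ofList array with
          | nil => rw [hl] at h4; simp at h4
          | cons y ys =>
            have hy : y = 4 := (hmem' y).mp (by simp [hl])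
            have hys : ys = [] := by
              cases hys : ys with
              | nil => rfl
              | cons z zs =>
                have hz : z = 4 := (hmem' z).mp (by simp [hl, hys])
                rw [hl, hys] at hnd
                simp [hy, hz] at hnd
            simp [hy, hys]
        rw [hsub, if_neg (by decide : ¬ (([4] : List Int).erase 4).length > 0)]
        symm
        rw [List.any_eq_false]
        intro x hx
        simpa using hall x hx

theorem statuses_all4_of_not_any (data : List (List (String × List (String × Int))))
    (h : ¬ (statuses data).any (fun s => decide (s ≠ 4)) = true) :
    jobs_status_alt data = none := by
  induction data with
  | nil => rfl
  | cons res rest ih =>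
    have hsplit : statuses (res :: rest) = (recStatus res).toList ++ statuses rest := by
      simp [statuses]
    have h1 : ¬ ((recStatus res).toList.any (fun s => decide (s ≠ 4)) = true) := by
      intro hh
      exact h (by rw [hsplit, List.any_append]; exact Bool.or_eq_true_iff.mpr (Or.inl hh))
    have h2 : ¬ ((statuses rest).any (fun s => decide (s ≠ 4)) = true) := by
      intro hh
      exact h (by rw [hsplit, List.any_append]; exact Bool.or_eq_true_iff.mpr (Or.inr hh))
    unfold jobs_status_alt
    by_cases hc : (PySem.Dict.mk res).contains "job"
    · rw [if_pos hc]
      have hs : (PySem.Dict.mk ((PySem.Dict.mk res).getD "job" [])).getD "status" 0 = 4 := by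
        by_contra hs
        exact h1 (by simp [recStatus, hc, hs])
      rw [if_neg (by simp [hs])]
      exact ih h2
    · rw [if_neg hc]
      exact ih h2

theorem alt_some_of_any (data : List (List (String × List (String × Int))))
    (h : (statuses data).any (fun s => decide (s ≠ 4)) = true) :
    jobs_status_alt data = some 1 := by
  induction data with
  | nil => simp [statuses] at h
  | cons res rest ih =>
    rw [show statuses (res :: rest) = (recStatus res).toList ++ statuses rest from by
          simp [statuses]] at h
    rw [List.any_append, Bool.or_eq_true] at h
    unfold jobs_status_alt
    by_cases hc : (PySem.Dict.mk res).contains "job"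
    · rw [if_pos hc]
      by_cases h4 : (PySem.Dict.mk ((PySem.Dict.mk res).getD "job" [])).getD "status" 0 ≠ 4
      · rw [if_pos h4]
      · rw [if_neg h4]
        rcases h with h | h
        · simp only [recStatus, hc, if_pos, Option.toList_some, List.any_cons, List.any_nil,
            Bool.or_false, decide_eq_true_eq] at h
          exact absurd h h4
        · exact ih h
    · rw [if_neg hc]
      rcases h with h | h
      · simp [recStatus, hc] at h
      · exact ih h

-- ===== VERDICT (by name: the statement is the Claim_ definition above) =====
theorem jobs_status_spec : Claim_equal_jobs_status := by
  intro data _ _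
  unfold Spec_jobs_status jobs_status
  rw [foldl_statuses data [], List.nil_append]
  show (if (statuses data).length = 0 then none
        else if has_pending (statuses data) then some (1 : Int) else none) = jobs_status_alt data
  rw [has_pending_eq_any]
  by_cases hany : (statuses data).any (fun s => decide (s ≠ 4)) = true
  · have hne : ¬ (statuses data).length = 0 := by
      intro h0
      rw [List.length_eq_zero_iff.mp h0] at hany
      simp at hany
    simp only [hne, hany, if_pos]
    exact (alt_some_of_any data hany).symm
  · rw [statuses_all4_of_not_any data hany]
    by_cases h0 : (statuses data).length = 0
    · simp [h0]
    · rw [if_neg h0, if_neg hany]
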